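-- pv_equiv track=rewrite | github.com/DTUWindEnergy/WindEnergyToolbox | wetb/utils/cluster_tools/pbswrap.py | parse_pbsnode_lall
-- ===== SOURCE A (Python) =====
-- def parse_pbsnode_lall(output):
--     """Parse output of pbsnodes -l all
--     """
--     # read the qstat output
--     frees, exclusives, others, down = 0, 0, 0, 0
--     nr_nodes = 0
--
--     nodes = {}
--
--     for k in output:
--         if len(k) > 2:
--             line = k.split()
--             status = line[1]
--             node = line[0].split('.')[0]
--
--             if node.startswith('v-'):
--                 #host = 'valde'
--                 # uglye monkey patch: ignore any valde nodes
--                 continue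
--
--             #elif node.startswith('g-'):
--                 #host = 'gorm'
--             #elif node.startswith('th-'):
--                 #host = 'thyra'
--
--             if status == 'free':
--                 frees += 1
--                 nr_nodes += 1
--             elif status == 'job-exclusive':
--                 exclusives += 1
--                 nr_nodes += 1
--             elif status == 'down,offline':
--                 down += 1
--             elif status == 'offline':
--                 down += 1
--             elif status == 'down':
--                 down += 1
--             else:
--                 others += 1
--
--             nodes[node] = status
--
--     #check = frees + exclusives + down + others
--
--     pbsnodes = {'frees' : frees, 'nr_nodes' : nr_nodes, 'others' : others,
--                'exclusives' : exclusives, 'down' : down}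
--
--     return pbsnodes, nodes
-- ===== SOURCE B (Python) =====
-- def parse_pbsnode_lall(output):
--     """Parse output of pbsnodes -l all
--     """
--     # pass 1: record node statuses and tally every status string (per line)
--     nodes = {}
--     count = {}
--     for k in output:
--         if len(k) > 2:
--             line = k.split()
--             status = line[1]
--             node = line[0].split('.')[0]
--             if node.startswith('v-'):
--                 # ignore any valde nodes
--                 continue
--             nodes[node] = status
--             count[status] = count.get(status, 0) + 1
--     # pass 2: derive the totals from the tally
--     frees = count.get('free', 0)
--     exclusives = count.get('job-exclusive', 0)
--     down = count.get('down', 0) + count.get('offline', 0) + count.get('down,offline', 0)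
--     others = sum(count.values()) - frees - exclusives - down
--     pbsnodes = {'frees': frees, 'nr_nodes': frees + exclusives,
--                 'others': others, 'exclusives': exclusives, 'down': down}
--     return pbsnodes, nodes
-- ===== Notes on version B (the rewrite author's own statement) =====
-- stated objective: alternative
-- what changed: Replaces A's five running counters updated by a status if/elif chain inside the loop with a single status tally dict built in one pass, from which all five totals (including others as total-minus-known) are derived afterwards.
-- outside the precondition, e.g. on parse_pbsnode_lall(['abc']): A raises IndexError, B raises IndexError
import Mathlib
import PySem

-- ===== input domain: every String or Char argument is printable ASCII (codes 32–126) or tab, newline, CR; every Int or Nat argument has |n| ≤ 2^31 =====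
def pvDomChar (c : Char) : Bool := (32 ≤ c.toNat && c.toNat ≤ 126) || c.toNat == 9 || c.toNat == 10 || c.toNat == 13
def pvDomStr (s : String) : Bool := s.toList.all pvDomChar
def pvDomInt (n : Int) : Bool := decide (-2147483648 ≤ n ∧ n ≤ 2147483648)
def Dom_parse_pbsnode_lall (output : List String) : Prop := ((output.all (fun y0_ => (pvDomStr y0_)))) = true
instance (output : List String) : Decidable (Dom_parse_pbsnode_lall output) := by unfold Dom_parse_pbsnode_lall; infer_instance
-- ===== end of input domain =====

-- B replaces A's five in-loop counters (if/elif chain) by a one-pass status tally dict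
-- from which the five totals are derived afterwards (objective: alternative decomposition).


-- ===== PORT A =====
-- A's loop body: state = (frees, exclusives, others, down, nr_nodes, nodes)
def pvLineA (st : Int × Int × Int × Int × Int × PySem.Dict String String) (k : String) :
    Int × Int × Int × Int × Int × PySem.Dict String String :=
  let (frees, exclusives, others, down, nr_nodes, nodes) := st
  if 2 < PySem.Str.len k then
    let line := PySem.Str.split₀ k
    let status := PySem.List.pyGetD line 1 ""          -- line[1]; Pre_ excludes the IndexError inputs
    let node := PySem.List.pyGetD ((PySem.Str.split? (PySem.List.pyGetD line 0 "") ".").getD []) 0 ""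
    if PySem.Str.startswith node "v-" then st
    else if status == "free" then
      (frees + 1, exclusives, others, down, nr_nodes + 1, nodes.insert node status)
    else if status == "job-exclusive" then
      (frees, exclusives + 1, others, down, nr_nodes + 1, nodes.insert node status)
    else if status == "down,offline" then
      (frees, exclusives, others, down + 1, nr_nodes, nodes.insert node status)
    else if status == "offline" then
      (frees, exclusives, others, down + 1, nr_nodes, nodes.insert node status)
    else if status == "down" then
      (frees, exclusives, others, down + 1, nr_nodes, nodes.insert node status)
    else
      (frees, exclusives, others + 1, down, nr_nodes, nodes.insert node status)
  else st

def parse_pbsnode_lall (output : List String) : (List (String × Int)) × (List (String × String)) :=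
  let st := output.foldl pvLineA (0, 0, 0, 0, 0, PySem.Dict.empty)
  let (frees, exclusives, others, down, nr_nodes, nodes) := st
  ([("frees", frees), ("nr_nodes", nr_nodes), ("others", others),
    ("exclusives", exclusives), ("down", down)], nodes.items)

-- ===== PORT B =====
-- B's loop body: state = (nodes, count)
def pvLineB (st : PySem.Dict String String × PySem.Dict String Int) (k : String) :
    PySem.Dict String String × PySem.Dict String Int :=
  let (nodes, count) := st
  if 2 < PySem.Str.len k then
    let line := PySem.Str.split₀ k
    let status := PySem.List.pyGetD line 1 ""          -- line[1]; Pre_ excludes the IndexError inputs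
    let node := PySem.List.pyGetD ((PySem.Str.split? (PySem.List.pyGetD line 0 "") ".").getD []) 0 ""
    if PySem.Str.startswith node "v-" then st
    else (nodes.insert node status, count.modify status 0 (· + 1))   -- count[status] = count.get(status, 0) + 1
  else st

def parse_pbsnode_lall_alt (output : List String) : (List (String × Int)) × (List (String × String)) :=
  let st := output.foldl pvLineB (PySem.Dict.empty, PySem.Dict.empty)
  let (nodes, count) := st
  let frees := count.getD "free" 0
  let exclusives := count.getD "job-exclusive" 0
  let down := count.getD "down" 0 + count.getD "offline" 0 + count.getD "down,offline" 0
  let others := count.values.sum - frees - exclusives - down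
  ([("frees", frees), ("nr_nodes", frees + exclusives), ("others", others),
    ("exclusives", exclusives), ("down", down)], nodes.items)

-- ===== PRECONDITION & SPEC =====
-- Pre_ excludes exactly the inputs where the Python raises IndexError: a line longer than
-- two characters whose whitespace-split has fewer than two fields (both A and B raise there).
def Pre_parse_pbsnode_lall (output : List String) : Prop :=
  ∀ k ∈ output, 2 < PySem.Str.len k → 2 ≤ (PySem.Str.split₀ k).length
instance (output : List String) : Decidable (Pre_parse_pbsnode_lall output) := by
  unfold Pre_parse_pbsnode_lall; infer_instance

def pvWitness_parse_pbsnode_lall : List String :=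
  ["n1.x free", "v-2.q down", "n3 job-exclusive", "n4 weird", "ab"]

def Spec_parse_pbsnode_lall (output : List String) (out : (List (String × Int)) × (List (String × String))) : Prop := out = parse_pbsnode_lall_alt output
instance (output : List String) (out : (List (String × Int)) × (List (String × String))) : Decidable (Spec_parse_pbsnode_lall output out) := by unfold Spec_parse_pbsnode_lall; infer_instance

-- ===== CLAIM (what is proved, stated in full; the proofs are below) =====
def Claim_equal_parse_pbsnode_lall : Prop := ∀ (output : List String), Dom_parse_pbsnode_lall output → Pre_parse_pbsnode_lall output → Spec_parse_pbsnode_lall output (parse_pbsnode_lall output)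

-- ===== LEMMAS AND PROOFS =====

-- Extraction shared by the two loop characterisations: the (node, status) a kept line yields.
def pvKept? (k : String) : Option (String × String) :=
  if 2 < PySem.Str.len k then
    let line := PySem.Str.split₀ k
    let status := PySem.List.pyGetD line 1 ""
    let node := PySem.List.pyGetD ((PySem.Str.split? (PySem.List.pyGetD line 0 "") ".").getD []) 0 ""
    if PySem.Str.startswith node "v-" then none else some (node, status)
  else none

def pvStatuses (output : List String) : List String :=
  (output.filterMap pvKept?).map Prod.snd

def pvNodesFold (output : List String) (nodes : PySem.Dict String String) : PySem.Dict String String :=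
  output.foldl (fun nd k => match pvKept? k with
    | some (n, s) => nd.insert n s
    | none => nd) nodes


-- step of A's loop, phrased through the shared extraction
lemma pvLineA_eq (f e o d n : Int) (nodes : PySem.Dict String String) (k : String) :
    pvLineA (f, e, o, d, n, nodes) k =
      match pvKept? k with
      | none => (f, e, o, d, n, nodes)
      | some (nd, s) =>
        if s == "free" then (f + 1, e, o, d, n + 1, nodes.insert nd s)
        else if s == "job-exclusive" then (f, e + 1, o, d, n + 1, nodes.insert nd s)
        else if s == "down,offline" then (f, e, o, d + 1, n, nodes.insert nd s)
        else if s == "offline" then (f, e, o, d + 1, n, nodes.insert nd s)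
        else if s == "down" then (f, e, o, d + 1, n, nodes.insert nd s)
        else (f, e, o + 1, d, n, nodes.insert nd s) := by
  simp only [pvLineA, pvKept?]
  split_ifs <;> simp_all

-- step of B's loop, phrased through the shared extraction
lemma pvLineB_eq (nodes : PySem.Dict String String) (cnt : PySem.Dict String Int) (k : String) :
    pvLineB (nodes, cnt) k =
      match pvKept? k with
      | none => (nodes, cnt)
      | some (nd, s) => (nodes.insert nd s, cnt.modify s 0 (· + 1)) := by
  simp only [pvLineB, pvKept?]
  split_ifs <;> simp_all

lemma pvStatuses_cons (k : String) (tl : List String) :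
    pvStatuses (k :: tl) =
      match pvKept? k with
      | none => pvStatuses tl
      | some (_, s) => s :: pvStatuses tl := by
  simp only [pvStatuses, List.filterMap_cons]
  cases pvKept? k <;> simp

lemma pvNodesFold_cons (k : String) (tl : List String) (nodes : PySem.Dict String String) :
    pvNodesFold (k :: tl) nodes =
      match pvKept? k with
      | none => pvNodesFold tl nodes
      | some (nd, s) => pvNodesFold tl (nodes.insert nd s) := by
  simp only [pvNodesFold, List.foldl_cons]
  cases pvKept? k <;> rfl

-- closed form of A's loop
lemma pvCharA (output : List String) : ∀ (f e o d n : Int) (nodes : PySem.Dict String String),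
    output.foldl pvLineA (f, e, o, d, n, nodes) =
      (f + ((pvStatuses output).count "free" : Int),
       e + ((pvStatuses output).count "job-exclusive" : Int),
       o + (((pvStatuses output).length : Int)
            - ((pvStatuses output).count "free" : Int)
            - ((pvStatuses output).count "job-exclusive" : Int)
            - ((pvStatuses output).count "down" : Int)
            - ((pvStatuses output).count "offline" : Int)
            - ((pvStatuses output).count "down,offline" : Int)),
       d + ((pvStatuses output).count "down" : Int)
         + ((pvStatuses output).count "offline" : Int)
         + ((pvStatuses output).count "down,offline" : Int),
       n + ((pvStatuses output).count "free" : Int)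
         + ((pvStatuses output).count "job-exclusive" : Int),
       pvNodesFold output nodes) := by
  induction output with
  | nil => intro f e o d n nodes; simp [pvStatuses, pvNodesFold]
  | cons k tl ih =>
    intro f e o d n nodes
    rw [List.foldl_cons, pvLineA_eq, pvStatuses_cons, pvNodesFold_cons]
    rcases hk : pvKept? k with _ | ⟨nd, s⟩
    · exact ih f e o d n nodes
    · by_cases h1 : s = "free"
      · subst h1; rw [ih]; simp; omega
      · by_cases h2 : s = "job-exclusive"
        · subst h2; rw [ih]; simp; omega
        · by_cases h3 : s = "down,offline"
          · subst h3; rw [ih]; simp; omega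
          · by_cases h4 : s = "offline"
            · subst h4; rw [ih]; simp; omega
            · by_cases h5 : s = "down"
              · subst h5; rw [ih]; simp; omega
              · simp only [beq_iff_eq, h1, h2, h3, h4, h5, if_false, ih]
                simp [h1, h2, h3, h4, h5]
                omega

-- closed form of B's loop
lemma pvCharB (output : List String) : ∀ (nodes : PySem.Dict String String) (cnt : PySem.Dict String Int),
    output.foldl pvLineB (nodes, cnt) =
      (pvNodesFold output nodes,
       (pvStatuses output).foldl (fun d x => d.modify x 0 (· + 1)) cnt) := by
  induction output with
  | nil => intro nodes cnt; simp [pvStatuses, pvNodesFold]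
  | cons k tl ih =>
    intro nodes cnt
    rw [List.foldl_cons, pvLineB_eq, pvStatuses_cons, pvNodesFold_cons]
    rcases hk : pvKept? k with _ | ⟨nd, s⟩
    · exact ih nodes cnt
    · rw [ih]; rfl

-- sum of a counter's values is the length of the counted list
lemma pvSumCounter (xs : List String) :
    (PySem.Dict.counter xs).values.sum = (xs.length : Int) := by
  rw [PySem.Dict.values_eq_map_keys _ (PySem.Dict.nodup_keys_counter xs) 0,
      PySem.Dict.keys_counter]
  have hperm : (PySem.Set.ofList xs).Perm xs.dedup := by
    rw [List.perm_ext_iff_of_nodup (PySem.Set.nodup_ofList xs) (List.nodup_dedup xs)]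
    intro a; rw [PySem.Set.mem_ofList, List.mem_dedup]
  rw [List.Perm.sum_eq (hperm.map _)]
  simp only [PySem.Dict.getD_counter]
  have h := List.sum_map_count_dedup_eq_length xs
  rw [← h]
  push_cast
  rw [List.map_map]
  rfl

-- ===== VERDICT (by name: the statement is the Claim_ definition above) =====
theorem parse_pbsnode_lall_spec : Claim_equal_parse_pbsnode_lall := by
  intro output _ _
  unfold Spec_parse_pbsnode_lall parse_pbsnode_lall parse_pbsnode_lall_alt
  rw [pvCharA, pvCharB, ← PySem.Dict.counter_eq_foldl]
  simp only [PySem.Dict.getD_counter, pvSumCounter]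
  ring_nf
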